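-- pv_equiv track=rewrite | github.com/QuantLet/RobustM | RobustM_PerformanceRussell3000/markowitz.py | block_iterator
-- ===== SOURCE A (Python) =====
-- def block_iterator(n, block_num):
--     m = n // block_num
--     r = n % block_num
--
--     lst = []
--     for j in range(block_num):
--         if j < r:
--             a = j * (m + 1)
--             b = (j + 1) * (m + 1)
--         else:
--             a = r * (m + 1) + (j - r) * m
--             b = r * (m + 1) + (j - r + 1) * m
--         lst.append((a, b))
--
--     return lst
-- ===== SOURCE B (Python) =====
-- from itertools import accumulate
--
--
-- def block_iterator(n, block_num):
--     m, r = divmod(n, block_num)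
--     sizes = [m + 1] * r + [m] * (block_num - r)
--     offsets = list(accumulate(sizes, initial=0))
--     return list(zip(offsets, offsets[1:]))
-- ===== Notes on version B (the rewrite author's own statement) =====
-- stated objective: simpler
-- what changed: Replaces the per-index closed-form branch (if j < r: ... else: ...) by building the list of block sizes ([m+1]*r + [m]*(block_num-r)), prefix-summing them with itertools.accumulate, and zipping consecutive offsets into (start, end) pairs.
import Mathlib
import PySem

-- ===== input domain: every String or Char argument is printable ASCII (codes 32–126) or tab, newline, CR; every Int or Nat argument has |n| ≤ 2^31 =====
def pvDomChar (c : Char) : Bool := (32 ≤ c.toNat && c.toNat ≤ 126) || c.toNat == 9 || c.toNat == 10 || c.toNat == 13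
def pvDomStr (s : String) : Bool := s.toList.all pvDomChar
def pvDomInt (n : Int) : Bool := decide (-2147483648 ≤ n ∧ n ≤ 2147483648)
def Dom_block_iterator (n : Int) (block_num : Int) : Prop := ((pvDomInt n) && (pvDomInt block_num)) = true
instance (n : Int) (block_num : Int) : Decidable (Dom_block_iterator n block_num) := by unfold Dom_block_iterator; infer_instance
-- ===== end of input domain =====

-- B builds the block sizes, prefix-sums them and zips consecutive offsets, instead of
-- A's per-index closed-form branch; same cost, simpler decomposition.

-- ===== PORT A =====
def block_iterator (n : Int) (block_num : Int) : List (Int × Int) :=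
  let m := PySem.Int.floordiv n block_num
  let r := PySem.Int.mod n block_num
  (PySem.List.pyRange 0 block_num 1).foldl
    (fun lst j =>
      if j < r then lst ++ [(j * (m + 1), (j + 1) * (m + 1))]
      else lst ++ [(r * (m + 1) + (j - r) * m, r * (m + 1) + (j - r + 1) * m)])
    []

-- ===== PORT B =====
-- port of itertools.accumulate(sizes, initial=s) with integer addition
def pvAccumulate (s : Int) : List Int → List Int
  | [] => [s]
  | x :: xs => s :: pvAccumulate (s + x) xs

def block_iterator_alt (n : Int) (block_num : Int) : List (Int × Int) :=
  let m := PySem.Int.floordiv n block_num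
  let r := PySem.Int.mod n block_num
  let sizes := List.replicate r.toNat (m + 1) ++ List.replicate (block_num - r).toNat m
  let offsets := pvAccumulate 0 sizes
  offsets.zip offsets.tail

-- ===== PRECONDITION & SPEC =====
-- A raises ZeroDivisionError when block_num = 0 (so does B); excluded.
def Pre_block_iterator (n : Int) (block_num : Int) : Prop := block_num ≠ 0
instance (n : Int) (block_num : Int) : Decidable (Pre_block_iterator n block_num) := by unfold Pre_block_iterator; infer_instance
def pvWitness_block_iterator : Int × Int := (10, 3)

def Spec_block_iterator (n : Int) (block_num : Int) (out : List (Int × Int)) : Prop := out = block_iterator_alt n block_num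
instance (n : Int) (block_num : Int) (out : List (Int × Int)) : Decidable (Spec_block_iterator n block_num out) := by unfold Spec_block_iterator; infer_instance

-- ===== CLAIM (what is proved, stated in full; the proofs are below) =====
def Claim_equal_block_iterator : Prop := ∀ (n : Int) (block_num : Int), Dom_block_iterator n block_num → Pre_block_iterator n block_num → Spec_block_iterator n block_num (block_iterator n block_num)

-- ===== LEMMAS AND PROOFS =====

-- (start, end) pairs produced by walking a cursor through a size list
def pvPairs (s : Int) : List Int → List (Int × Int)
  | [] => []
  | x :: xs => (s, s + x) :: pvPairs (s + x) xs

theorem pvAccumulate_cons_tail (s : Int) (l : List Int) :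
    pvAccumulate s l = s :: (pvAccumulate s l).tail := by
  cases l <;> simp [pvAccumulate]

theorem pvZip_accumulate (l : List Int) (s : Int) :
    (pvAccumulate s l).zip (pvAccumulate s l).tail = pvPairs s l := by
  induction l generalizing s with
  | nil => simp [pvAccumulate, pvPairs]
  | cons x xs ih =>
    rw [show pvAccumulate s (x :: xs) = s :: pvAccumulate (s + x) xs from rfl,
        pvAccumulate_cons_tail (s + x) xs]
    simp only [List.zip_cons_cons, List.tail_cons, pvPairs]
    rw [← pvAccumulate_cons_tail (s + x) xs, ih]

theorem pvPairs_append (xs ys : List Int) (s : Int) :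
    pvPairs s (xs ++ ys) = pvPairs s xs ++ pvPairs (s + xs.sum) ys := by
  induction xs generalizing s with
  | nil => simp [pvPairs]
  | cons x t ih => simp [pvPairs, ih, add_assoc]

theorem pvPairs_replicate (k : Nat) (s x : Int) :
    pvPairs s (List.replicate k x)
      = (List.range k).map (fun (i : Nat) => (s + (i : Int) * x, s + ((i : Int) + 1) * x)) := by
  induction k generalizing s with
  | zero => simp [pvPairs]
  | succ k ih =>
    rw [List.replicate_succ, List.range_succ_eq_map]
    simp only [pvPairs, ih, List.map_cons, List.map_map]
    refine congrArg₂ _ ?_ (List.map_congr_left ?_)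
    · push_cast; simp only [Prod.mk.injEq]; constructor <;> ring
    · intro i _
      simp only [Function.comp]
      push_cast
      simp only [Prod.mk.injEq]
      constructor <;> ring

theorem block_iterator_eq (n bn : Int) (hbn : bn ≠ 0) :
    block_iterator n bn = block_iterator_alt n bn := by
  have hfun : ∀ (r m : Int),
      (fun (lst : List (Int × Int)) (j : Int) =>
        if j < r then lst ++ [(j * (m + 1), (j + 1) * (m + 1))]
        else lst ++ [(r * (m + 1) + (j - r) * m, r * (m + 1) + (j - r + 1) * m)])
      = (fun lst j => lst ++ [if j < r then (j * (m + 1), (j + 1) * (m + 1))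
          else (r * (m + 1) + (j - r) * m, r * (m + 1) + (j - r + 1) * m)]) := by
    intro r m; funext lst j; split <;> rfl
  simp only [block_iterator, block_iterator_alt]
  set m := PySem.Int.floordiv n bn with hm
  set r := PySem.Int.mod n bn with hr
  rw [hfun, PySem.List.foldl_append_singleton_eq_map, pvZip_accumulate, pvPairs_append,
      pvPairs_replicate, pvPairs_replicate]
  simp only [List.nil_append, zero_add, List.sum_replicate, nsmul_eq_mul]
  rcases lt_or_gt_of_ne hbn with hneg | hpos
  · -- bn < 0 : both sides empty
    obtain ⟨h1, h2⟩ := PySem.Int.mod_neg_bounds n hneg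
    rw [PySem.List.pyRange_one_eq_nil (by omega : bn ≤ (0:Int)),
        show r.toNat = 0 by omega, show (bn - r).toNat = 0 by omega]
    simp
  · -- bn > 0
    have hr0 : 0 ≤ r := PySem.Int.mod_nonneg n hpos
    have hrlt : r < bn := PySem.Int.mod_lt n hpos
    rw [show ((r.toNat : Int)) = r from Int.toNat_of_nonneg hr0,
        PySem.List.pyRange_one_append 0 r bn hr0 hrlt.le, List.map_append,
        PySem.List.pyRange_one 0 r, PySem.List.pyRange_one r bn]
    simp only [List.map_map, sub_zero]
    refine congrArg₂ (· ++ ·) ?_ ?_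
    · -- first r blocks of size m + 1
      apply List.map_congr_left
      intro i hi
      rw [List.mem_range] at hi
      have hlt : (0 : Int) + (i : Int) < r := by omega
      simp only [Function.comp, if_pos hlt, Prod.mk.injEq]
      constructor <;> ring
    · -- remaining bn - r blocks of size m
      apply List.map_congr_left
      intro i _
      have hge : ¬ (r + (i : Int) < r) := by omega
      simp only [Function.comp, if_neg hge, Prod.mk.injEq]
      constructor <;> ring

-- ===== VERDICT (by name: the statement is the Claim_ definition above) =====
theorem block_iterator_spec : Claim_equal_block_iterator := by
  intro n bn _ hpre
  unfold Spec_block_iterator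
  exact block_iterator_eq n bn hpre
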